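-- pv_equiv track=rewrite | github.com/Mahnoor-Ghaffar/Hack-03-AI-Employee-giaic | dashboard/app.py | parse_invoices
-- ===== SOURCE A (Python) =====
-- def parse_invoices(content: str) -> list:
--     """Parse invoices markdown"""
--     invoices = []
--     # Simple parsing - look for invoice entries
--     lines = content.split('\n')
--     current_invoice = {}
--
--     for line in lines:
--         if line.startswith('### Invoice'):
--             if current_invoice:
--                 invoices.append(current_invoice)
--             current_invoice = {'title': line.strip('#').strip()}
--         elif ':' in line and current_invoice:
--             key, value = line.split(':', 1)
--             current_invoice[key.strip().lower().replace(' ', '_')] = value.strip()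
--
--     if current_invoice:
--         invoices.append(current_invoice)
--
--     return invoices[-10:]  # Return last 10 invoices
-- ===== SOURCE B (Python) =====
-- def _parse_block(block):
--     d = {'title': block[0].strip('#').strip()}
--     for line in block[1:]:
--         if ':' in line:
--             key, value = line.split(':', 1)
--             d[key.strip().lower().replace(' ', '_')] = value.strip()
--     return d
--
--
-- def _split_blocks(lines):
--     """Group lines into blocks, each starting at a '### Invoice' header;
--     lines before the first header are dropped."""
--     blocks = []
--     n = len(lines)
--     i = 0
--     while i < n and not lines[i].startswith('### Invoice'):
--         i += 1
--     while i < n: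
--         j = i + 1
--         while j < n and not lines[j].startswith('### Invoice'):
--             j += 1
--         blocks.append(lines[i:j])
--         i = j
--     return blocks
--
--
-- def parse_invoices(content: str) -> list:
--     """Parse invoices markdown: group lines into header-led blocks, then parse each."""
--     blocks = _split_blocks(content.split('\n'))
--     return [_parse_block(b) for b in blocks][-10:]
-- ===== Notes on version B (the rewrite author's own statement) =====
-- stated objective: alternative
-- what changed: Replaces A's single interleaved state machine (one flat loop carrying the current dict) by a two-level decomposition: first group the lines into header-led blocks (dropping the pre-header preamble), then parse each block into a dict independently.
import Mathlib
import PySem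

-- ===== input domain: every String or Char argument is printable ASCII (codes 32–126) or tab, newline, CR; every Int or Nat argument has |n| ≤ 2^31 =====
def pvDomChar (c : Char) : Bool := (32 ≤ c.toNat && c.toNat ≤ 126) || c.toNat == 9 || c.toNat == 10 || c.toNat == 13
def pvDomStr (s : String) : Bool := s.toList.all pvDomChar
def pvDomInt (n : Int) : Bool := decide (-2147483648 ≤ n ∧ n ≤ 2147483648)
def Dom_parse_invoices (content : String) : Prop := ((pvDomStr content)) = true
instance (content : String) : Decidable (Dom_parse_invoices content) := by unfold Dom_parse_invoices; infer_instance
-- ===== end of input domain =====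

-- B replaces A's single interleaved state machine by a two-level decomposition (group lines
-- into header-led blocks, then parse each block independently); objective: alternative, not faster.

-- shared leaf operations (identical line-level code in both Pythons)
def pvIsHeader (line : String) : Bool := PySem.Str.startswith line "### Invoice"

def pvTitle (line : String) : String := PySem.Str.strip (PySem.Str.stripChars line "#")

-- key, value = line.split(':', 1); d[key.strip().lower().replace(' ','_')] = value.strip()
-- (the match is exhaustive in use: split(':',1) yields two parts whenever ':' is in line)
def pvAddField (d : PySem.Dict String String) (line : String) : PySem.Dict String String :=
  match PySem.Str.splitMax? line ":" 1 with
  | some (k :: v :: _) =>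
      d.insert (PySem.Str.replace (PySem.Str.lower (PySem.Str.strip k)) " " "_") (PySem.Str.strip v)
  | _ => d

-- ===== PORT A =====
-- A's for-loop; current_invoice is {} (falsy) exactly until the first header, so it is
-- modelled as Option (none = the initial empty dict); `if current_invoice:` = `.toList`.
def pvLoopA : List String → List (PySem.Dict String String) → Option (PySem.Dict String String) →
    List (PySem.Dict String String)
  | [], acc, cur => acc ++ cur.toList
  | l :: ls, acc, cur =>
    if pvIsHeader l then
      pvLoopA ls (acc ++ cur.toList) (some (PySem.Dict.ofList [("title", pvTitle l)]))
    else if PySem.Str.isIn ":" l then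
      match cur with
      | some d => pvLoopA ls acc (some (pvAddField d l))
      | none => pvLoopA ls acc none
    else pvLoopA ls acc cur

def parse_invoices (content : String) : List (List (String × String)) :=
  PySem.List.slice
    ((pvLoopA ((PySem.Str.split? content "\n").getD []) [] none).map PySem.Dict.items)
    (some (-10)) none

-- ===== PORT B =====
-- the body loop of _parse_block
def pvBody (d : PySem.Dict String String) (body : List String) : PySem.Dict String String :=
  body.foldl (fun d l => if PySem.Str.isIn ":" l then pvAddField d l else d) d

def pvParseBlock (b : List String) : PySem.Dict String String :=
  match b with
  | [] => PySem.Dict.empty   -- unreachable: blocks are nonempty (start with a header)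
  | h :: body => pvBody (PySem.Dict.ofList [("title", pvTitle h)]) body

-- _split_blocks: the first while-loop skips the preamble; each inner index scan `j`
-- splits the remainder at the next header, i.e. takeWhile/dropWhile on ¬header (exact).
def pvBlocks : List String → List (List String)
  | [] => []
  | l :: ls =>
    if pvIsHeader l then
      (l :: ls.takeWhile (fun x => !pvIsHeader x)) ::
        pvBlocks (ls.dropWhile (fun x => !pvIsHeader x))
    else pvBlocks ls
  termination_by ls => ls.length
  decreasing_by
  · exact Nat.lt_succ_of_le (List.length_dropWhile_le _ _)
  · exact Nat.lt_succ_self _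

def parse_invoices_alt (content : String) : List (List (String × String)) :=
  PySem.List.slice
    ((pvBlocks ((PySem.Str.split? content "\n").getD [])).map (fun b => (pvParseBlock b).items))
    (some (-10)) none

-- ===== PRECONDITION & SPEC =====
def Spec_parse_invoices (content : String) (out : List (List (String × String))) : Prop := out = parse_invoices_alt content
instance (content : String) (out : List (List (String × String))) : Decidable (Spec_parse_invoices content out) := by unfold Spec_parse_invoices; infer_instance

-- ===== CLAIM (what is proved, stated in full; the proofs are below) =====
def Claim_equal_parse_invoices : Prop := ∀ (content : String), Dom_parse_invoices content → Spec_parse_invoices content (parse_invoices content)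

-- ===== LEMMAS AND PROOFS =====

-- inside a block, A's loop folds the field updates (one line of pvBody)
lemma pvLoopA_some (ls : List String) (acc : List (PySem.Dict String String))
    (d : PySem.Dict String String) :
    pvLoopA ls acc (some d) =
      acc ++ pvBody d (ls.takeWhile (fun x => !pvIsHeader x)) ::
        (pvBlocks (ls.dropWhile (fun x => !pvIsHeader x))).map pvParseBlock := by
  induction ls generalizing acc d with
  | nil => simp [pvLoopA, pvBody, pvBlocks]
  | cons l ls ih =>
    by_cases h : pvIsHeader l = true
    · simp only [pvLoopA, h, if_true, List.takeWhile_cons, List.dropWhile_cons,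
        Bool.not_true, ih]
      simp [pvBlocks, h, pvBody, pvParseBlock]
    · simp only [Bool.not_eq_true] at h
      by_cases hc : PySem.Chars.isIn [':'] l.toList = true
      · simp [pvLoopA, h, hc, ih, pvBody]
      · simp only [Bool.not_eq_true] at hc
        simp [pvLoopA, h, hc, ih, pvBody]

-- before the first header, A's loop discards every line (= B dropping the preamble)
lemma pvLoopA_none (ls : List String) (acc : List (PySem.Dict String String)) :
    pvLoopA ls acc none = acc ++ (pvBlocks ls).map pvParseBlock := by
  induction ls generalizing acc with
  | nil => simp [pvLoopA, pvBlocks]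
  | cons l ls ih =>
    by_cases h : pvIsHeader l = true
    · simp only [pvLoopA, h, if_true, Option.toList_none, List.append_nil, pvLoopA_some]
      simp [pvBlocks, h, pvParseBlock]
    · simp only [Bool.not_eq_true] at h
      by_cases hc : PySem.Chars.isIn [':'] l.toList = true
      · simp [pvLoopA, h, hc, ih, pvBlocks]
      · simp only [Bool.not_eq_true] at hc
        simp [pvLoopA, h, hc, ih, pvBlocks]

-- ===== VERDICT (by name: the statement is the Claim_ definition above) =====
theorem parse_invoices_spec : Claim_equal_parse_invoices := by
  intro content _
  unfold Spec_parse_invoices parse_invoices parse_invoices_alt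
  rw [pvLoopA_none]
  simp [List.map_map]
  rfl
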